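-- pv_equiv track=rewrite | github.com/mpettersson/PythonReview | questions/list_and_recursion/find_two_sum_max_less_than_t.py | find_two_sum_max_less_than_t_via_pointer
-- ===== SOURCE A (Python) =====
-- def find_two_sum_max_less_than_t_via_pointer(l, t):
--     if l is not None and t is not None:
--         result = -1
--         l.sort()                                    # O(n * log(n)) to sort.
--         lo = 0
--         hi = len(l) - 1
--         while lo < hi:
--             temp = l[lo] + l[hi]
--             if temp < t:
--                 result = max(result, temp)
--                 lo += 1
--             else:
--                 hi -= 1
--         return result
-- ===== SOURCE B (Python) =====
-- def find_two_sum_max_less_than_t_via_pointer(l, t):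
--     if l is None or t is None:
--         return None
--     l.sort()  # kept so the caller-visible in-place sort matches the original
--     best = -1
--     for i in range(len(l)):
--         for j in range(i + 1, len(l)):
--             s = l[i] + l[j]
--             if s < t and s > best:
--                 best = s
--     return best
-- ===== Notes on version B (the rewrite author's own statement) =====
-- stated objective: simpler
-- what changed: Replaces A's while-loop two-pointer sweep (lo/hi converging over the sorted list) by a plain maximum over all index pairs i<j recorded with two nested for-loops; the in-place l.sort() is kept so the caller-visible mutation matches.
import Mathlib
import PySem

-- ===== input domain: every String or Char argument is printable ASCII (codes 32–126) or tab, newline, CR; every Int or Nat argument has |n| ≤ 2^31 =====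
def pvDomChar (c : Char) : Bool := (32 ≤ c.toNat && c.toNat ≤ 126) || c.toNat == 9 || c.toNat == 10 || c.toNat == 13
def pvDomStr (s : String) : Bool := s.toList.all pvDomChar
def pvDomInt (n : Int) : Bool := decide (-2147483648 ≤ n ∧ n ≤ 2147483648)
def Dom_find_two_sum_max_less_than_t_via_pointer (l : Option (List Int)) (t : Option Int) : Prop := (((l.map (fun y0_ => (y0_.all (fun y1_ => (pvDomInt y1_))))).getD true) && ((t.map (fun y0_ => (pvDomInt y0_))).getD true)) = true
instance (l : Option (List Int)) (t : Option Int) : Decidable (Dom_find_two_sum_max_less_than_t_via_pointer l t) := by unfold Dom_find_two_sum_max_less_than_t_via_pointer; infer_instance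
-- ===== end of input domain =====

-- B replaces A's two-pointer sweep by a plain maximum over all index pairs of the sorted
-- list (objective: simpler, not faster).  Both Pythons sort l in place; the equivalence
-- proved here is about the RETURN value (the in-place sort side effect is identical anyway).

-- ===== PORT A =====
-- the while loop of A; lo, hi are Nats, every access l[lo]/l[hi] has 0 ≤ lo < hi < length,
-- so getD is exact there (for the empty list Python's hi = -1 and this hi = 0 both skip the loop)
def twoSumLoopA (s : List Int) (t : Int) (lo hi : Nat) (result : Int) : Int :=
  if h : lo < hi then
    -- temp = l[lo] + l[hi], inlined
    if s.getD lo 0 + s.getD hi 0 < t then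
      twoSumLoopA s t (lo + 1) hi (max result (s.getD lo 0 + s.getD hi 0))
    else twoSumLoopA s t lo (hi - 1) result
  else result
termination_by hi - lo
decreasing_by all_goals omega

def find_two_sum_max_less_than_t_via_pointer (l : Option (List Int)) (t : Option Int) : Option Int :=
  match l, t with
  | some l, some t =>
    let s := PySem.List.sorted l (fun x => x) false
    some (twoSumLoopA s t 0 (s.length - 1) (-1))
  | _, _ => none

-- ===== PORT B =====
-- Source B: nested for-loops over all pairs i < j of the sorted list, keeping the best sum < t
def bruteLoopB (s : List Int) (t : Int) : Int :=
  (List.range s.length).foldl (fun best i =>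
    (List.range' (i + 1) (s.length - (i + 1))).foldl (fun best j =>
      if s.getD i 0 + s.getD j 0 < t ∧ best < s.getD i 0 + s.getD j 0
      then s.getD i 0 + s.getD j 0 else best) best) (-1)

-- 'if l is None or t is None: return None' as two nested option matches
def find_two_sum_max_less_than_t_via_pointer_alt (l : Option (List Int)) (t : Option Int) : Option Int :=
  match l with
  | none => none
  | some l =>
    match t with
    | none => none
    | some t => some (bruteLoopB (PySem.List.sorted l (fun x => x) false) t)

-- ===== PRECONDITION & SPEC =====
def Spec_find_two_sum_max_less_than_t_via_pointer (l : Option (List Int)) (t : Option Int) (out : Option Int) : Prop := out = find_two_sum_max_less_than_t_via_pointer_alt l t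
instance (l : Option (List Int)) (t : Option Int) (out : Option Int) : Decidable (Spec_find_two_sum_max_less_than_t_via_pointer l t out) := by unfold Spec_find_two_sum_max_less_than_t_via_pointer; infer_instance

-- ===== CLAIM (what is proved, stated in full; the proofs are below) =====
def Claim_equal_find_two_sum_max_less_than_t_via_pointer : Prop := ∀ (l : Option (List Int)) (t : Option Int), Dom_find_two_sum_max_less_than_t_via_pointer l t → Spec_find_two_sum_max_less_than_t_via_pointer l t (find_two_sum_max_less_than_t_via_pointer l t)

-- ===== LEMMAS AND PROOFS =====

-- the common characterisation: r is the maximum pair sum < t over s (or -1 if none)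
def PairBest (s : List Int) (t r : Int) : Prop :=
  (-1 ≤ r) ∧
  (r = -1 ∨ (r < t ∧ ∃ i j : Nat, i < j ∧ j < s.length ∧ s.getD i 0 + s.getD j 0 = r)) ∧
  (∀ i j : Nat, i < j → j < s.length → s.getD i 0 + s.getD j 0 < t → s.getD i 0 + s.getD j 0 ≤ r)

lemma pairBest_unique (s : List Int) (t rA rB : Int)
    (hA : PairBest s t rA) (hB : PairBest s t rB) : rA = rB := by
  obtain ⟨hA1, hA2, hA3⟩ := hA
  obtain ⟨hB1, hB2, hB3⟩ := hB
  rcases hA2 with hA2 | ⟨hAt, i, j, hij, hj, hsum⟩ <;>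
    rcases hB2 with hB2 | ⟨hBt, i', j', hij', hj', hsum'⟩
  · omega
  · have := hA3 i' j' hij' hj' (by omega); omega
  · have := hB3 i j hij hj (by omega); omega
  · have h1 := hB3 i j hij hj (by omega)
    have h2 := hA3 i' j' hij' hj' (by omega)
    omega

-- ----- B side: the nested fold computes a PairBest value -----

-- inner fold lemmas, over an arbitrary index list js and value function g
lemma inner_ge (t : Int) (g : Nat → Int) (js : List Nat) :
    ∀ b : Int, b ≤ js.foldl (fun b j => if g j < t ∧ b < g j then g j else b) b := by
  induction js with
  | nil => intro b; simp
  | cons j js ih =>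
    intro b
    simp only [List.foldl_cons]
    refine le_trans ?_ (ih _)
    split_ifs with h
    · omega
    · omega

lemma inner_ub (t : Int) (g : Nat → Int) (js : List Nat) :
    ∀ b : Int, ∀ j ∈ js, g j < t →
      g j ≤ js.foldl (fun b j => if g j < t ∧ b < g j then g j else b) b := by
  induction js with
  | nil => intro b j hj; simp at hj
  | cons j0 js ih =>
    intro b j hj hlt
    simp only [List.foldl_cons]
    rcases List.mem_cons.mp hj with rfl | hj
    · refine le_trans ?_ (inner_ge t g js _)
      split_ifs with h
      · omega
      · omega
    · exact ih _ j hj hlt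

lemma inner_mem (t : Int) (g : Nat → Int) (js : List Nat) :
    ∀ b : Int, js.foldl (fun b j => if g j < t ∧ b < g j then g j else b) b = b ∨
      ∃ j ∈ js, js.foldl (fun b j => if g j < t ∧ b < g j then g j else b) b = g j ∧ g j < t := by
  induction js with
  | nil => intro b; simp
  | cons j0 js ih =>
    intro b
    simp only [List.foldl_cons]
    rcases ih (if g j0 < t ∧ b < g j0 then g j0 else b) with h | ⟨j, hj, h1, h2⟩
    · rw [h]
      split_ifs with hc
      · exact Or.inr ⟨j0, List.mem_cons_self, rfl, hc.1⟩
      · exact Or.inl rfl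
    · exact Or.inr ⟨j, List.mem_cons_of_mem _ hj, h1, h2⟩

-- step of the outer fold
def outerStep (s : List Int) (t : Int) (best : Int) (i : Nat) : Int :=
  (List.range' (i + 1) (s.length - (i + 1))).foldl (fun best j =>
    if s.getD i 0 + s.getD j 0 < t ∧ best < s.getD i 0 + s.getD j 0
    then s.getD i 0 + s.getD j 0 else best) best

lemma outer_ge (s : List Int) (t : Int) (is : List Nat) :
    ∀ b : Int, b ≤ is.foldl (outerStep s t) b := by
  induction is with
  | nil => intro b; simp
  | cons i is ih =>
    intro b
    simp only [List.foldl_cons]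
    exact le_trans (inner_ge t _ _ b) (ih _)

lemma outer_ub (s : List Int) (t : Int) (is : List Nat) :
    ∀ b : Int, ∀ i ∈ is, ∀ j : Nat, i < j → j < s.length →
      s.getD i 0 + s.getD j 0 < t →
      s.getD i 0 + s.getD j 0 ≤ is.foldl (outerStep s t) b := by
  induction is with
  | nil => intro b i hi; simp at hi
  | cons i0 is ih =>
    intro b i hi j hij hj hlt
    simp only [List.foldl_cons]
    rcases List.mem_cons.mp hi with rfl | hi
    · refine le_trans ?_ (outer_ge s t is _)
      exact inner_ub t _ _ b j (by rw [List.mem_range'_1]; omega) hlt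
    · exact ih _ i hi j hij hj hlt

lemma outer_mem (s : List Int) (t : Int) (is : List Nat) :
    ∀ b : Int, is.foldl (outerStep s t) b = b ∨
      ∃ i j : Nat, i < j ∧ j < s.length ∧
        is.foldl (outerStep s t) b = s.getD i 0 + s.getD j 0 ∧
        s.getD i 0 + s.getD j 0 < t := by
  induction is with
  | nil => intro b; simp
  | cons i0 is ih =>
    intro b
    simp only [List.foldl_cons]
    rcases ih (outerStep s t b i0) with h | ⟨i, j, hij, hj, h1, h2⟩
    · rw [h]
      rcases inner_mem t (fun j => s.getD i0 0 + s.getD j 0) _ b with h' | ⟨j, hj, h1, h2⟩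
      · exact Or.inl h'
      · rw [List.mem_range'_1] at hj
        exact Or.inr ⟨i0, j, by omega, by omega, h1, h2⟩
    · exact Or.inr ⟨i, j, hij, hj, h1, h2⟩

lemma bruteLoopB_pairBest (s : List Int) (t : Int) : PairBest s t (bruteLoopB s t) := by
  have hrw : bruteLoopB s t = List.foldl (outerStep s t) (-1) (List.range s.length) := rfl
  rw [hrw]
  refine ⟨outer_ge s t _ _, ?_, ?_⟩
  · rcases outer_mem s t (List.range s.length) (-1) with h | ⟨i, j, hij, hj, h1, h2⟩
    · exact Or.inl h
    · exact Or.inr ⟨by rw [h1]; exact h2, i, j, hij, hj, h1.symm⟩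
  · intro i j hij hj hlt
    exact outer_ub s t _ _ i (by rw [List.mem_range]; omega) j hij hj hlt

-- ----- A side: the two-pointer loop computes a PairBest value on a sorted list -----

lemma sorted_getD_mono (l : List Int) (p q : Nat) (hpq : p ≤ q)
    (hq : q < (PySem.List.sorted l (fun x => x) false).length) :
    (PySem.List.sorted l (fun x => x) false).getD p 0 ≤
    (PySem.List.sorted l (fun x => x) false).getD q 0 := by
  rw [List.getD_eq_getElem _ _ (by omega), List.getD_eq_getElem _ _ hq]
  exact PySem.List.sorted_id_getElem_mono l hpq hq

lemma twoSumLoopA_inv (s : List Int) (t : Int)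
    (hmono : ∀ p q : Nat, p ≤ q → q < s.length → s.getD p 0 ≤ s.getD q 0) :
    ∀ d lo hi result, hi - lo = d → hi < s.length → -1 ≤ result →
      (result = -1 ∨ (result < t ∧ ∃ i j : Nat, i < j ∧ j < s.length ∧ s.getD i 0 + s.getD j 0 = result)) →
      (∀ i j : Nat, i < j → j < s.length → s.getD i 0 + s.getD j 0 < t →
        ¬(lo ≤ i ∧ j ≤ hi) → s.getD i 0 + s.getD j 0 ≤ result) →
      PairBest s t (twoSumLoopA s t lo hi result) := by
  intro d
  induction d using Nat.strong_induction_on with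
  | _ d ih =>
    intro lo hi result hd hhi hr1 hr2 hr3
    rw [twoSumLoopA]
    split_ifs with h hlt
    · -- temp < t : lo advances, result becomes max result temp
      refine ih (hi - (lo + 1)) (by omega) (lo + 1) hi _ rfl hhi (by omega) ?_ ?_
      · by_cases hc : result ≤ s.getD lo 0 + s.getD hi 0
        · refine Or.inr ⟨by omega, lo, hi, h, hhi, by omega⟩
        · rcases hr2 with h2 | ⟨h2, i, j, hij, hj, hsum⟩
          · exact Or.inl (by omega)
          · exact Or.inr ⟨by omega, i, j, hij, hj, by omega⟩
      · intro i j hij hj hsum hnot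
        by_cases hold : lo ≤ i ∧ j ≤ hi
        · -- then i = lo, so the sum is at most temp
          have hi_eq : i = lo := by omega
          subst hi_eq
          have : s.getD j 0 ≤ s.getD hi 0 := hmono j hi (by omega) hhi
          omega
        · have := hr3 i j hij hj hsum hold; omega
    · -- temp ≥ t : hi decreases
      refine ih ((hi - 1) - lo) (by omega) lo (hi - 1) result rfl (by omega) hr1 hr2 ?_
      intro i j hij hj hsum hnot
      by_cases hold : lo ≤ i ∧ j ≤ hi
      · -- then j = hi, but s[i] + s[hi] ≥ s[lo] + s[hi] ≥ t, contradiction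
        have hj_eq : j = hi := by omega
        subst hj_eq
        have : s.getD lo 0 ≤ s.getD i 0 := hmono lo i (by omega) (by omega)
        omega
      · exact hr3 i j hij hj hsum hold
    · -- loop finished: lo ≥ hi, every pair is covered by hr3
      refine ⟨hr1, hr2, ?_⟩
      intro i j hij hj hsum
      exact hr3 i j hij hj hsum (by omega)

lemma twoSumLoopA_pairBest (s : List Int) (t : Int)
    (hmono : ∀ p q : Nat, p ≤ q → q < s.length → s.getD p 0 ≤ s.getD q 0) :
    PairBest s t (twoSumLoopA s t 0 (s.length - 1) (-1)) := by
  rcases Nat.eq_zero_or_pos s.length with h0 | hpos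
  · have hval : twoSumLoopA s t 0 (s.length - 1) (-1) = -1 := by
      rw [twoSumLoopA, dif_neg (by omega)]
    rw [hval]
    refine ⟨by omega, Or.inl rfl, ?_⟩
    intro i j hij hj _
    omega
  · refine twoSumLoopA_inv s t hmono _ 0 (s.length - 1) (-1) rfl (by omega) (by omega)
      (Or.inl rfl) ?_
    intro i j hij hj hsum hnot
    omega

-- ===== VERDICT (by name: the statement is the Claim_ definition above) =====
theorem find_two_sum_max_less_than_t_via_pointer_spec : Claim_equal_find_two_sum_max_less_than_t_via_pointer := by
  intro l t _
  unfold Spec_find_two_sum_max_less_than_t_via_pointer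
  match l, t with
  | none, none => rfl
  | none, some t => rfl
  | some l, none => rfl
  | some l, some t =>
    unfold find_two_sum_max_less_than_t_via_pointer find_two_sum_max_less_than_t_via_pointer_alt
    simp only [Option.some.injEq]
    exact pairBest_unique _ t _ _
      (twoSumLoopA_pairBest _ t (fun p q hpq hq => sorted_getD_mono l p q hpq hq))
      (bruteLoopB_pairBest _ t)
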